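-- pv_equiv track=rewrite | github.com/samuelbigio/DrumLooper | Main/SynthPage/DisplayRhythm.py | parseFileNames
-- ===== SOURCE A (Python) =====
-- def parseFileNames(files, dir):
--
--     rest = []
--     restD = []
--     note = []
--     noteD = []
--
--     for file in files:
--         if file[-3:] != "png":
--             #print file[-3:]
--             continue
--
--
--         if file[1:3] == "ND":
--             noteD.append(dir +file)
--         elif file[1:3] == "NN":
--             note.append(dir +file)
--         elif file[1:3] == "RD":
--             restD.append(dir + file)
--         elif file[1:3] == "RN":
--             rest.append(dir +file)
--
--         #else:
--             #print file, "NO GOOD"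
--
--     return [rest,restD,note,noteD]
-- ===== SOURCE B (Python) =====
-- def parseFileNames(files, dir):
--     pngs = [f for f in files if f[-3:] == "png"]
--     rest  = [dir + f for f in pngs if f[1:3] == "RN"]
--     restD = [dir + f for f in pngs if f[1:3] == "RD"]
--     note  = [dir + f for f in pngs if f[1:3] == "NN"]
--     noteD = [dir + f for f in pngs if f[1:3] == "ND"]
--     return [rest, restD, note, noteD]
-- ===== Notes on version B (the rewrite author's own statement) =====
-- stated objective: alternative
-- what changed: Replaces A's single pass with four mutable accumulators and an if/elif chain by a pre-filter of the png files followed by four independent comprehensions, one per prefix code.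
import Mathlib
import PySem

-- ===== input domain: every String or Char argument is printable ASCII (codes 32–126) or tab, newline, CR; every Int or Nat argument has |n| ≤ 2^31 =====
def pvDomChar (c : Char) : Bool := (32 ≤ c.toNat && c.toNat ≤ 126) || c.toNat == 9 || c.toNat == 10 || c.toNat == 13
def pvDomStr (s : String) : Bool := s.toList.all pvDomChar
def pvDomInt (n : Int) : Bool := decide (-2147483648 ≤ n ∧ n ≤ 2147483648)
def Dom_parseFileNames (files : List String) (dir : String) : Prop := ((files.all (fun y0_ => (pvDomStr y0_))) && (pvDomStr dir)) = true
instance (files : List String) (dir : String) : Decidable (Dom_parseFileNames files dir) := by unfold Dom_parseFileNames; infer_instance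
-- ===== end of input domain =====

-- B replaces A's single branching pass with a png pre-filter and four independent per-code comprehensions (alternative decomposition, same cost).

-- ===== PORT A =====
-- loop over files with the four accumulator lists rest/restD/note/noteD, as in A
def pfnLoop (dir : String) : List String → List String → List String → List String → List String → List (List String)
  | [], rest, restD, note, noteD => [rest, restD, note, noteD]
  | f :: fs, rest, restD, note, noteD =>
    if PySem.Str.slice f (some (-3)) none ≠ "png" then
      pfnLoop dir fs rest restD note noteD
    else if PySem.Str.slice f (some 1) (some 3) = "ND" then
      pfnLoop dir fs rest restD note (noteD ++ [dir ++ f])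
    else if PySem.Str.slice f (some 1) (some 3) = "NN" then
      pfnLoop dir fs rest restD (note ++ [dir ++ f]) noteD
    else if PySem.Str.slice f (some 1) (some 3) = "RD" then
      pfnLoop dir fs rest (restD ++ [dir ++ f]) note noteD
    else if PySem.Str.slice f (some 1) (some 3) = "RN" then
      pfnLoop dir fs (rest ++ [dir ++ f]) restD note noteD
    else
      pfnLoop dir fs rest restD note noteD

def parseFileNames (files : List String) (dir : String) : List (List String) :=
  pfnLoop dir files [] [] [] []

-- ===== PORT B =====
-- one comprehension per prefix code, over the pre-filtered png list
def pfnBucket (dir code : String) (pngs : List String) : List String :=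
  (pngs.filter (fun f => PySem.Str.slice f (some 1) (some 3) == code)).map (fun f => dir ++ f)

def parseFileNames_alt (files : List String) (dir : String) : List (List String) :=
  let pngs := files.filter (fun f => PySem.Str.slice f (some (-3)) none == "png")
  [pfnBucket dir "RN" pngs, pfnBucket dir "RD" pngs, pfnBucket dir "NN" pngs, pfnBucket dir "ND" pngs]

-- ===== PRECONDITION & SPEC =====
def Spec_parseFileNames (files : List String) (dir : String) (out : List (List String)) : Prop := out = parseFileNames_alt files dir
instance (files : List String) (dir : String) (out : List (List String)) : Decidable (Spec_parseFileNames files dir out) := by unfold Spec_parseFileNames; infer_instance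

-- ===== CLAIM (what is proved, stated in full; the proofs are below) =====
def Claim_equal_parseFileNames : Prop := ∀ (files : List String) (dir : String), Dom_parseFileNames files dir → Spec_parseFileNames files dir (parseFileNames files dir)

-- ===== LEMMAS AND PROOFS =====
-- shorthand for B's bucket of a given code over the not-yet-filtered list
def pfnB (dir code : String) (fs : List String) : List String :=
  pfnBucket dir code (fs.filter (fun f => PySem.Str.slice f (some (-3)) none == "png"))

theorem pfnLoop_spec (dir : String) (fs : List String) :
    ∀ rest restD note noteD, pfnLoop dir fs rest restD note noteD =
      [rest ++ pfnB dir "RN" fs, restD ++ pfnB dir "RD" fs,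
       note ++ pfnB dir "NN" fs, noteD ++ pfnB dir "ND" fs] := by
  induction fs with
  | nil => intro rest restD note noteD; simp [pfnLoop, pfnB, pfnBucket]
  | cons f fs ih =>
    intro rest restD note noteD
    by_cases hp : PySem.Str.slice f (some (-3)) none = "png"
    · by_cases h1 : PySem.Str.slice f (some 1) (some 3) = "ND"
      · simp [pfnLoop, hp, h1, ih, pfnB, pfnBucket]
      · by_cases h2 : PySem.Str.slice f (some 1) (some 3) = "NN"
        · simp [pfnLoop, hp, h2, ih, pfnB, pfnBucket]
        · by_cases h3 : PySem.Str.slice f (some 1) (some 3) = "RD"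
          · simp [pfnLoop, hp, h3, ih, pfnB, pfnBucket]
          · by_cases h4 : PySem.Str.slice f (some 1) (some 3) = "RN"
            · simp [pfnLoop, hp, h4, ih, pfnB, pfnBucket]
            · simp [pfnLoop, hp, h1, h2, h3, h4, ih, pfnB, pfnBucket]
    · simp [pfnLoop, hp, ih, pfnB, pfnBucket]

-- ===== VERDICT (by name: the statement is the Claim_ definition above) =====
theorem parseFileNames_spec : Claim_equal_parseFileNames := by
  intro files dir _
  unfold Spec_parseFileNames parseFileNames parseFileNames_alt
  simp [pfnLoop_spec, pfnB]
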